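-- pv_equiv track=rewrite | github.com/csraytrace/Atiquant_1 | Nachbau_ati_sauber/probieren 29.py | add_first_four_with_concentration
-- ===== SOURCE A (Python) =====
-- def add_first_four_with_concentration(arrays, Konzentration):
--     result = []
--     for i in range(len(arrays[0])):  # Durchlaufe die Subarrays
--         summed_values = [
--             sum(Konzentration[idx] * arr[i][j] for idx, arr in enumerate(arrays)) for j in range(4)
--         ]  # Summe der ersten 4 Werte multipliziert mit den Multiplikatoren
--         result.append(summed_values)
--     return result
-- ===== SOURCE B (Python) =====
-- def add_first_four_with_concentration(arrays, Konzentration):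
--     n = len(arrays[0])
--     # stage 1: each array becomes its concentration-scaled n-by-4 matrix
--     scaled = [[[Konzentration[i] * arr[r][c] for c in range(4)] for r in range(n)]
--               for i, arr in enumerate(arrays)]
--     # stage 2: reduce the scaled matrices by elementwise matrix addition
--     total = scaled[0]
--     for m in scaled[1:]:
--         total = [[a + b for a, b in zip(r1, r2)] for r1, r2 in zip(total, m)]
--     return total
-- ===== Notes on version B (the rewrite author's own statement) =====
-- stated objective: alternative
-- what changed: B works in two staged whole-matrix passes: it first maps each array to its concentration-scaled n-by-4 matrix, then reduces those matrices with zip-based elementwise matrix addition, instead of A's per-cell generator that re-scans all arrays for every output cell.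
import Mathlib
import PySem

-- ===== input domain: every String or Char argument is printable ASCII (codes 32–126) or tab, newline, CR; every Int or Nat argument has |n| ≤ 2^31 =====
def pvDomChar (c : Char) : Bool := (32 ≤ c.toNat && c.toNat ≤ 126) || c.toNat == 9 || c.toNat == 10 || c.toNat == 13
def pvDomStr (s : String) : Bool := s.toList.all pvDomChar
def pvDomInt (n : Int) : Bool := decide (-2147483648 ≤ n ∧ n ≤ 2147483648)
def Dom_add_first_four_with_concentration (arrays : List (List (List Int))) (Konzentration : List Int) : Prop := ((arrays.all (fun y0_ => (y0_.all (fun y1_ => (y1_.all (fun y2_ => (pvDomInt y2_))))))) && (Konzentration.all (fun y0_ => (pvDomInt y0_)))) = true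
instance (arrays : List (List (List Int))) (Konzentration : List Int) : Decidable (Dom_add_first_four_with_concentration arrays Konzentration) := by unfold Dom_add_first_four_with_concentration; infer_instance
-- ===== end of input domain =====

-- B builds the result in two staged passes — map each array to its concentration-scaled n-by-4
-- matrix, then reduce those matrices by zip-based elementwise matrix addition — instead of A's
-- per-cell loop that re-scans all arrays for every output cell (alternative decomposition).


-- ===== PORT A =====
def add_first_four_with_concentration (arrays : List (List (List Int))) (Konzentration : List Int) : List (List Int) :=
  (PySem.List.pyRange 0 ((PySem.List.pyGetD arrays 0 []).length : Int) 1).foldl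
    (fun result i =>
      result ++ [(PySem.List.pyRange 0 4 1).map (fun j =>
        (PySem.List.enumerate arrays 0).foldl (fun s p =>
          s + PySem.List.pyGetD Konzentration p.1 0 *
            PySem.List.pyGetD (PySem.List.pyGetD p.2 i []) j 0) 0)])
    []

-- ===== PORT B =====
-- elementwise matrix addition of two matrices via zip (B's inner comprehension)
def pvMatAdd (t m : List (List Int)) : List (List Int) :=
  (t.zip m).map (fun rr => (rr.1.zip rr.2).map (fun ab => ab.1 + ab.2))

def add_first_four_with_concentration_alt (arrays : List (List (List Int))) (Konzentration : List Int) : List (List Int) :=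
  let n : Int := ((PySem.List.pyGetD arrays 0 []).length : Int)
  let scaled := (PySem.List.enumerate arrays 0).map (fun p =>
    (PySem.List.pyRange 0 n 1).map (fun r =>
      (PySem.List.pyRange 0 4 1).map (fun c =>
        PySem.List.pyGetD Konzentration p.1 0 *
          PySem.List.pyGetD (PySem.List.pyGetD p.2 r []) c 0)))
  (PySem.List.slice scaled (some 1) none).foldl pvMatAdd (PySem.List.pyGetD scaled 0 [])

-- ===== PRECONDITION & SPEC =====
-- Pre_: exactly where the Python A returns (elsewhere it raises IndexError): arrays nonempty,
-- and either arrays[0] is empty (A returns []) or Konzentration is at least as long as arrays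
-- and every array has ≥ len(arrays[0]) rows whose first len(arrays[0]) rows each have ≥ 4 entries.
def Pre_add_first_four_with_concentration (arrays : List (List (List Int))) (Konzentration : List Int) : Prop :=
  arrays ≠ [] ∧ ((arrays.headD []).length = 0 ∨
    (arrays.length ≤ Konzentration.length ∧
      ∀ arr ∈ arrays, (arrays.headD []).length ≤ arr.length ∧
        ∀ row ∈ arr.take (arrays.headD []).length, 4 ≤ row.length))
instance (arrays : List (List (List Int))) (Konzentration : List Int) : Decidable (Pre_add_first_four_with_concentration arrays Konzentration) := by unfold Pre_add_first_four_with_concentration; infer_instance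

def pvWitness_add_first_four_with_concentration : List (List (List Int)) × List Int :=
  ([[[1, 2, 3, 4], [5, 6, 7, 8]], [[1, 1, 1, 1], [2, 2, 2, 2]]], [3, -2])

def Spec_add_first_four_with_concentration (arrays : List (List (List Int))) (Konzentration : List Int) (out : List (List Int)) : Prop := out = add_first_four_with_concentration_alt arrays Konzentration
instance (arrays : List (List (List Int))) (Konzentration : List Int) (out : List (List Int)) : Decidable (Spec_add_first_four_with_concentration arrays Konzentration out) := by unfold Spec_add_first_four_with_concentration; infer_instance

-- ===== CLAIM =====
def Claim_equal_add_first_four_with_concentration : Prop := ∀ (arrays : List (List (List Int))) (Konzentration : List Int), Dom_add_first_four_with_concentration arrays Konzentration → Pre_add_first_four_with_concentration arrays Konzentration → Spec_add_first_four_with_concentration arrays Konzentration (add_first_four_with_concentration arrays Konzentration)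

-- ===== LEMMAS AND PROOFS =====

-- mapIdx with the identity at every index is the identity
theorem pvMapIdx_id {α : Type} (l : List α) : List.mapIdx (fun _ v => v) l = l := by
  apply List.ext_getElem <;> simp

-- one matrix addition, on matrices whose shapes dominate the accumulator's
theorem pvMatAdd_eq (g m : List (List Int)) (hlen : g.length ≤ m.length)
    (hrow : ∀ i (hi : i < g.length), (g[i]).length ≤ (m[i]'(lt_of_lt_of_le hi hlen)).length) :
    pvMatAdd g m = g.mapIdx (fun i r => r.mapIdx (fun j v => v + (m.getD i []).getD j 0)) := by
  unfold pvMatAdd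
  apply List.ext_getElem
  · simp [Nat.min_eq_left hlen]
  · intro i hi hi'
    have hig : i < g.length := by simpa using hi'
    simp only [List.getElem_map, List.getElem_zip, List.getElem_mapIdx]
    apply List.ext_getElem
    · simp [Nat.min_eq_left (hrow i hig)]
    · intro j hj hj'
      have hjg : j < (g[i]).length := by simpa using hj'
      simp only [List.getElem_map, List.getElem_zip, List.getElem_mapIdx]
      have hx : (m.getD i []).getD j 0 = (m[i]'(lt_of_lt_of_le hig hlen))[j]'(lt_of_lt_of_le hjg (hrow i hig)) := by
        rw [List.getD_eq_getElem m [] (lt_of_lt_of_le hig hlen),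
          List.getD_eq_getElem _ 0 (lt_of_lt_of_le hjg (hrow i hig))]
      rw [hx]

-- the whole reduction: every cell is its initial value plus the sum of the matrices' cells
theorem pvFoldAdd (ms : List (List (List Int))) (g : List (List Int))
    (hms : ∀ m ∈ ms, g.length ≤ m.length ∧
      ∀ i (hi : i < g.length), (g[i]).length ≤ (m.getD i []).length) :
    ms.foldl pvMatAdd g = g.mapIdx (fun i r => r.mapIdx (fun j v =>
      v + (ms.map (fun m => (m.getD i []).getD j 0)).sum)) := by
  induction ms generalizing g with
  | nil => simp [pvMapIdx_id]
  | cons m ms ih =>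
      obtain ⟨hlen, hrow⟩ := hms m (List.mem_cons_self ..)
      have hrow' : ∀ i (hi : i < g.length), (g[i]).length ≤ (m[i]'(lt_of_lt_of_le hi hlen)).length := by
        intro i hi
        have := hrow i hi
        rwa [List.getD_eq_getElem m [] (lt_of_lt_of_le hi hlen)] at this
      rw [List.foldl_cons, pvMatAdd_eq g m hlen hrow', ih]
      · rw [List.mapIdx_mapIdx]
        congr 1
        funext i r
        simp only [Function.comp]
        rw [List.mapIdx_mapIdx]
        congr 1
        funext j v
        simp only [Function.comp, List.map_cons, List.sum_cons]
        ring
      · intro m' hm'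
        obtain ⟨hlen', hrow''⟩ := hms m' (List.mem_cons_of_mem _ hm')
        constructor
        · simpa using hlen'
        · intro i hi
          have hig : i < g.length := by simpa using hi
          have := hrow'' i hig
          simpa using this

-- entries of enumerate
theorem pvEnum_getElem {α : Type} (xs : List α) (s : Int) (i : Nat) (h : i < xs.length) :
    (PySem.List.enumerate xs s)[i]'(by simpa [PySem.List.length_enumerate] using h) =
      (s + (i : Int), xs[i]) := by
  induction xs generalizing s i with
  | nil => simp at h
  | cons x xs ih =>
      cases i with
      | zero => simp [PySem.List.enumerate_cons]
      | succ i =>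
          have h' : i < xs.length := by simpa using h
          simp only [PySem.List.enumerate_cons, List.getElem_cons_succ]
          rw [ih (s + 1) i h']
          rw [Prod.mk.injEq]
          exact ⟨by push_cast; ring, rfl⟩

theorem add_first_four_spec_aux (arrays : List (List (List Int))) (Konzentration : List Int) :
    add_first_four_with_concentration arrays Konzentration =
      add_first_four_with_concentration_alt arrays Konzentration := by
  rcases arrays with _ | ⟨a, rest⟩
  · rfl
  · set K := Konzentration with hk
    set AR := a :: rest with hAR
    set n := (PySem.List.pyGetD AR 0 []).length with hn
    set f : Int × List (List Int) → Int → Int → Int := fun p r c =>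
      PySem.List.pyGetD K p.1 0 *
        PySem.List.pyGetD (PySem.List.pyGetD p.2 r []) c 0 with hf
    set scal : List (List (List Int)) := (PySem.List.enumerate AR 0).map (fun p =>
      (PySem.List.pyRange 0 (n : Int) 1).map (fun r =>
        (PySem.List.pyRange 0 4 1).map (fun c => f p r c))) with hscal
    have hslen : scal.length = AR.length := by
      simp [hscal, PySem.List.length_enumerate]
    have hAR0 : 0 < AR.length := by rw [hAR]; simp
    have h0 : 0 < scal.length := by rw [hslen]; exact hAR0
    have hscal_get : ∀ m (hm : m < AR.length),
        scal[m]'(by rw [hslen]; exact hm) =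
          (PySem.List.pyRange 0 (n : Int) 1).map (fun r =>
            (PySem.List.pyRange 0 4 1).map (fun c => f ((m : Int), AR[m]) r c)) := by
      intro m hm
      simp only [hscal, List.getElem_map]
      rw [pvEnum_getElem AR 0 m hm, zero_add]
    have hslen2 : ∀ m (hm : m < AR.length), (scal[m]'(by rw [hslen]; exact hm)).length = n := by
      intro m hm
      rw [hscal_get m hm, List.length_map, PySem.List.length_pyRange_one]
      omega
    have hsrow : ∀ m (hm : m < AR.length) k (hk : k < n),
        ((scal[m]'(by rw [hslen]; exact hm))[k]'(by rw [hslen2 m hm]; exact hk)).length = 4 := by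
      intro m hm k hkn
      rw [List.getElem_of_eq (hscal_get m hm), List.getElem_map, List.length_map,
        PySem.List.length_pyRange_one]
      decide
    have hcell : ∀ m (hm : m < AR.length) k (hk : k < n) l (hl : l < 4),
        ((scal[m]'(by rw [hslen]; exact hm)).getD k []).getD l 0 =
          f ((m : Int), AR[m]) (0 + (k : Int)) (0 + (l : Int)) := by
      intro m hm k hkn l hl
      rw [List.getD_eq_getElem _ [] (by rw [hslen2 m hm]; exact hkn),
        List.getD_eq_getElem _ 0 (by rw [hsrow m hm k hkn]; exact hl)]
      simp only [List.getElem_of_eq (hscal_get m hm), List.getElem_map,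
        PySem.List.getElem_pyRange_one]
    -- A as a map over ranges
    have hA : add_first_four_with_concentration AR K =
        (PySem.List.pyRange 0 (n : Int) 1).map (fun i =>
          (PySem.List.pyRange 0 4 1).map (fun j =>
            (PySem.List.enumerate AR 0).foldl (fun s p => s + f p i j) 0)) := by
      unfold add_first_four_with_concentration
      rw [PySem.List.foldl_append_singleton_eq_map, List.nil_append]
    -- B as the mapIdx form given by pvFoldAdd
    have hgd : scal.getD 0 [] = scal[0]'h0 := List.getD_eq_getElem scal [] h0
    have hshape : ∀ m' ∈ scal.drop 1, (scal.getD 0 []).length ≤ m'.length ∧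
        ∀ i (hi : i < (scal.getD 0 []).length), ((scal.getD 0 [])[i]).length ≤ (m'.getD i []).length := by
      intro m' hm'
      obtain ⟨idx, hidx, hval⟩ := List.getElem_of_mem (List.mem_of_mem_drop hm')
      have hidx' : idx < AR.length := by rwa [hslen] at hidx
      have hm'len : m'.length = n := by rw [← hval]; exact hslen2 idx hidx'
      have hg0len : (scal.getD 0 []).length = n := by rw [hgd]; exact hslen2 0 hAR0
      constructor
      · rw [hm'len, hg0len]
      · intro i hi
        have hin : i < n := by rwa [hg0len] at hi
        have h1 : ((scal.getD 0 [])[i]'hi).length = 4 := by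
          rw [List.getElem_of_eq hgd]; exact hsrow 0 hAR0 i hin
        have h2 : (m'.getD i []).length = 4 := by
          rw [List.getD_eq_getElem m' [] (by omega : i < m'.length), List.getElem_of_eq hval.symm]
          exact hsrow idx hidx' i hin
        rw [h1, h2]
    have hB : add_first_four_with_concentration_alt AR K =
        (scal.getD 0 []).mapIdx (fun i r => r.mapIdx (fun j v =>
          v + ((scal.drop 1).map (fun m' => (m'.getD i []).getD j 0)).sum)) := by
      unfold add_first_four_with_concentration_alt
      have hs1 := PySem.List.slice_from (xs := scal) (a := 1) (by norm_num)
      rw [Int.toNat_one] at hs1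
      simp only [← hscal]
      rw [hs1, PySem.List.pyGetD_zero, pvFoldAdd _ _ hshape]
    rw [hgd] at hB
    rw [hA, hB]
    apply List.ext_getElem
    · rw [List.length_map, List.length_mapIdx, PySem.List.length_pyRange_one, hslen2 0 hAR0]
      omega
    · intro k hk1 hk2
      have hkn : k < n := by
        rw [List.length_map, PySem.List.length_pyRange_one] at hk1; omega
      simp only [List.getElem_map, List.getElem_mapIdx, PySem.List.getElem_pyRange_one]
      apply List.ext_getElem
      · rw [List.length_map, List.length_mapIdx, PySem.List.length_pyRange_one, hsrow 0 hAR0 k hkn]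
        decide
      · intro l hl1 hl2
        have hl : l < 4 := by
          rw [List.length_map, PySem.List.length_pyRange_one] at hl1; omega
        simp only [List.getElem_map, List.getElem_mapIdx, PySem.List.getElem_pyRange_one]
        rw [PySem.List.foldl_add, zero_add]
        have hg0 : ((scal[0]'h0)[k]'(by rw [hslen2 0 hAR0]; exact hkn))[l]'(by
            rw [hsrow 0 hAR0 k hkn]; exact hl) =
              ((scal[0]'h0).getD k []).getD l 0 := by
          rw [List.getD_eq_getElem _ ([] : List Int) (by rw [hslen2 0 hAR0]; exact hkn),
            List.getD_eq_getElem _ (0 : Int) (by rw [hsrow 0 hAR0 k hkn]; exact hl)]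
        have hmaps : (PySem.List.enumerate AR 0).map (fun p => f p (0 + (k : Int)) (0 + (l : Int))) =
            scal.map (fun m' => (m'.getD k []).getD l 0) := by
          apply List.ext_getElem
          · simp [PySem.List.length_enumerate, hslen]
          · intro m hm1 hm2
            have hmA : m < AR.length := by simpa [PySem.List.length_enumerate] using hm1
            rw [List.getElem_map, List.getElem_map, pvEnum_getElem AR 0 m hmA, zero_add,
              hcell m hmA k hkn l hl]
        have hsplit : scal.map (fun m' => (m'.getD k []).getD l 0) =
            ((scal[0]'h0).getD k []).getD l 0 ::
              (scal.drop 1).map (fun m' => (m'.getD k []).getD l 0) := by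
          conv_lhs => rw [← List.drop_zero (l := scal), ← List.getElem_cons_drop h0, List.map_cons]
        have hsum := congrArg List.sum (hmaps.trans hsplit)
        rw [List.sum_cons] at hsum
        rw [hsum, hg0]

-- ===== VERDICT =====
theorem add_first_four_with_concentration_spec : Claim_equal_add_first_four_with_concentration := by
  intro arrays Konzentration _ _
  exact add_first_four_spec_aux arrays Konzentration
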